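-- pv_equiv track=rewrite | github.com/miliar/Code_Jam_Webscraper | Solutions_in_python/Problem_178/B-revenge.py | revenge
-- ===== SOURCE A (Python) =====
-- def revenge(row):
--     """
--     The pattern can be seen, as counting the number of changes of
--     sign from right to left.
--     """
--     row_len = len(row)
--     i = row_len - 1
--     prev_sign = '+'
--     result =  0
--     while i >= 0:
--         sign = row[i]
--         if sign != prev_sign:
--             result += 1
--         prev_sign = sign
--         i -= 1
--     return result
-- ===== SOURCE B (Python) =====
-- def revenge(row):
--     # compress row into maximal runs of equal signs, then count transitions
--     keys = []
--     for s in row: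
--         if not keys or keys[-1] != s:
--             keys.append(s)
--     if not keys:
--         return 0
--     return len(keys) - 1 + (keys[-1] != '+')
-- ===== Notes on version B (the rewrite author's own statement) =====
-- stated objective: alternative
-- what changed: B compresses the row into maximal runs of equal signs in a single forward pass and derives the count as (number of runs - 1) plus an end correction against '+', instead of A's right-to-left index loop comparing each element to the previous sign.
import Mathlib
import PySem

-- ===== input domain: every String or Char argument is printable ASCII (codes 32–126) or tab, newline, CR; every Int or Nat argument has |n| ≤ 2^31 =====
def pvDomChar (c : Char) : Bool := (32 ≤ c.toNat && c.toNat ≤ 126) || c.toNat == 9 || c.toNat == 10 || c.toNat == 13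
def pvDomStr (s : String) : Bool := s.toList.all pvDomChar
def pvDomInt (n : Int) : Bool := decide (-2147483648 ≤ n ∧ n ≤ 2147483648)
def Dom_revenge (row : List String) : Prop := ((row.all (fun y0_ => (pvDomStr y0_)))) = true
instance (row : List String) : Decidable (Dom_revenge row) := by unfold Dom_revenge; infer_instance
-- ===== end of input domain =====

-- B compresses the row into maximal runs of equal signs and counts transitions by a formula;
-- A scans right to left comparing each element to the previous sign (objective: alternative).

-- ===== PORT A =====
-- while i >= 0: sign = row[i]; if sign != prev_sign: result += 1; prev_sign = sign; i -= 1
-- ported as recursion on the counter n = i + 1 (indices n-1 down to 0, always in range)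
def revengeLoopA (row : List String) : Nat → String → Int → Int
  | 0, _, res => res
  | n + 1, prev, res =>
      let sign := row.getD n ""
      revengeLoopA row n sign (if sign ≠ prev then res + 1 else res)

def revenge (row : List String) : Int :=
  revengeLoopA row row.length "+" 0

-- ===== PORT B =====
-- keys = run keys of row, built by one forward pass appending when the last key differs
def revengeKeys (row : List String) : List String :=
  row.foldl (fun ks s => if ks = [] ∨ ks.getLast? ≠ some s then ks ++ [s] else ks) []

def revenge_alt (row : List String) : Int :=
  let keys := revengeKeys row
  if keys = [] then 0
  else ((keys.length : Int) - 1) + (if keys.getLast? ≠ some "+" then 1 else 0)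

-- ===== PRECONDITION & SPEC =====
def Spec_revenge (row : List String) (out : Int) : Prop := out = revenge_alt row
instance (row : List String) (out : Int) : Decidable (Spec_revenge row out) := by unfold Spec_revenge; infer_instance

-- ===== CLAIM (what is proved, stated in full; the proofs are below) =====
def Claim_equal_revenge : Prop := ∀ (row : List String), Dom_revenge row → Spec_revenge row (revenge row)

-- ===== LEMMAS AND PROOFS =====

-- number of unequal adjacent pairs
def adjD : List String → Int
  | [] => 0
  | [_] => 0
  | x :: y :: t => (if x ≠ y then 1 else 0) + adjD (y :: t)

-- run keys of a list given the previous sign p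
def rkD (p : String) : List String → List String
  | [] => []
  | y :: t => if y = p then rkD p t else y :: rkD y t

theorem adj_two (l : List String) (x p : String) :
    adjD (l ++ [x, p]) = adjD (l ++ [x]) + (if x ≠ p then 1 else 0) := by
  induction l with
  | nil => simp [adjD]
  | cons a l ih =>
    cases l with
    | nil => simp [adjD]
    | cons c t =>
      simp only [List.cons_append, adjD] at ih ⊢
      rw [ih]; ring

theorem loopA_eq (row : List String) :
    ∀ n, n ≤ row.length → ∀ prev res,
      revengeLoopA row n prev res = res + adjD (row.take n ++ [prev]) := by
  intro n
  induction n with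
  | zero => intro _ prev res; simp [revengeLoopA, adjD]
  | succ n ih =>
    intro hn prev res
    have hlt : n < row.length := Nat.lt_of_succ_le hn
    have htake : row.take (n + 1) = row.take n ++ [row.getD n ""] := by
      rw [List.take_add_one]
      congr 1
      simp [List.getElem?_eq_getElem hlt]
    simp only [revengeLoopA]
    rw [ih (Nat.le_of_lt hlt), htake]
    have h2 : row.take n ++ [row.getD n ""] ++ [prev]
        = row.take n ++ [row.getD n "", prev] := by simp
    rw [h2, adj_two]
    split_ifs <;> ring

theorem revenge_eq_adj (row : List String) :
    revenge row = adjD (row ++ ["+"]) := by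
  rw [revenge, loopA_eq row row.length (le_refl _), List.take_length]
  simp

theorem foldl_rk (l : List String) :
    ∀ (ks : List String) (x : String),
      List.foldl (fun ks s => if ks = [] ∨ ks.getLast? ≠ some s then ks ++ [s] else ks)
        (ks ++ [x]) l = ks ++ x :: rkD x l := by
  induction l with
  | nil => intro ks x; simp [rkD]
  | cons y t ih =>
    intro ks x
    simp only [List.foldl_cons]
    by_cases hxy : y = x
    · subst hxy
      have : ¬ ((ks ++ [y]) = [] ∨ (ks ++ [y]).getLast? ≠ some y) := by
        simp
      rw [if_neg this, ih]
      simp [rkD]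
    · have hxy' : x ≠ y := Ne.symm hxy
      have : ((ks ++ [x]) = [] ∨ (ks ++ [x]).getLast? ≠ some y) := by
        simp [hxy']
      rw [if_pos this]
      have := ih (ks ++ [x]) y
      simp only [List.append_assoc] at this ⊢
      rw [this]
      simp [rkD, hxy]

theorem keys_eq (x : String) (t : List String) :
    revengeKeys (x :: t) = x :: rkD x t := by
  have h := foldl_rk t [] x
  simpa [revengeKeys] using h

theorem rk_length (t : List String) :
    ∀ x, ((x :: rkD x t).length : Int) - 1 = adjD (x :: t) := by
  induction t with
  | nil => intro x; simp [rkD, adjD]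
  | cons y t' ih =>
    intro x
    by_cases hxy : y = x
    · subst hxy
      have h1 : rkD y (y :: t') = rkD y t' := by simp [rkD]
      rw [h1, ih y]
      simp [adjD]
    · simp only [rkD, if_neg hxy, adjD]
      have := ih y
      simp only [List.length_cons] at this ⊢
      push_cast at this ⊢
      rw [← this]
      have : x ≠ y := fun h => hxy h.symm
      simp [this]; ring
  
theorem rk_getLast (t : List String) :
    ∀ x, (x :: rkD x t).getLast? = (x :: t).getLast? := by
  induction t with
  | nil => intro x; simp [rkD]
  | cons y t' ih =>
    intro x
    by_cases hxy : y = x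
    · subst hxy
      have h1 : rkD y (y :: t') = rkD y t' := by simp [rkD]
      rw [h1, ih y, List.getLast?_cons_cons]
    · simp only [rkD, if_neg hxy]
      rw [List.getLast?_cons_cons, ih y, List.getLast?_cons_cons]

theorem adj_append_plus (x : String) (t : List String) :
    adjD ((x :: t) ++ ["+"]) =
      adjD (x :: t) + (if (x :: t).getLast? ≠ some "+" then 1 else 0) := by
  have hne : (x :: t) ≠ [] := by simp
  have hdec : (x :: t) = (x :: t).dropLast ++ [(x :: t).getLast hne] := by
    simp [List.dropLast_append_getLast hne]
  have h2 : (x :: t) ++ ["+"] = (x :: t).dropLast ++ [(x :: t).getLast hne, "+"] := by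
    conv_lhs => rw [hdec]
    simp
  rw [h2, adj_two, ← hdec]
  have h3 : (x :: t).getLast? = some ((x :: t).getLast hne) :=
    List.getLast?_eq_some_getLast (h := hne)
  rw [h3]
  simp

-- ===== VERDICT (by name: the statement is the Claim_ definition above) =====
theorem revenge_spec : Claim_equal_revenge := by
  intro row _
  unfold Spec_revenge
  cases row with
  | nil => simp [revenge, revengeLoopA, revenge_alt, revengeKeys]
  | cons x t =>
    have hb : revenge_alt (x :: t)
        = (((x :: rkD x t).length : Int) - 1)
          + (if (x :: rkD x t).getLast? ≠ some "+" then 1 else 0) := by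
      unfold revenge_alt
      rw [keys_eq]
      rw [if_neg (show ¬ (x :: rkD x t) = [] by simp)]
    rw [revenge_eq_adj, adj_append_plus, hb, rk_length t x, rk_getLast t x]
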